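-- pv_equiv track=rewrite | github.com/xiaofuhu/lsm-image-matching | shift_img.py | shift_img
-- ===== SOURCE A (Python) =====
-- def shift_img(img, x, y):
--     for i in range(len(img)):
--         if (x >= 0):
--             for j in reversed(range(len(img[i]))):
--                 if j >= x:
--                     img[i][j] = img[i][j - x]
--                 else:
--                     img[i][j] = img[i][0]
--         else:
--             for j in range(len(img[i])):
--                 if j < len(img[i]) + x:
--                     img[i][j] = img[i][j - x]
--                 else:
--                     img[i][j] = img[i][len(img[i]) - 1]
--
--     if (y >= 0):
--         for i in reversed(range(len(img))):
--             for j in range(len(img[i])):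
--                 if i >= y:
--                     img[i][j] = img[i - y][j]
--                 else:
--                     img[i][j] = img[0][j]
--     else:
--         for i in range(len(img)):
--             if i < len(img) + y:
--                 for j in range(len(img[i])):
--                     img[i][j] = img[i - y][j]
--             else:
--                 for j in range(len(img[i])):
--                     img[i][j] = img[len(img) - 1][j]
--     return img
-- ===== SOURCE B (Python) =====
-- def shift_img(img, x, y):
--     # Snapshot-and-clamp rewrite: each output pixel is looked up at a clamped
--     # source index in a snapshot, instead of A's order-dependent in-place loops.
--     # Mutates and returns the same img object, like A.
--     orig = [row[:] for row in img]
--     for i, row in enumerate(img):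
--         n = len(row)
--         for j in range(n):
--             c = j - x
--             if c < 0:
--                 c = 0
--             elif c > n - 1:
--                 c = n - 1
--             row[j] = orig[i][c]
--     H = [row[:] for row in img]
--     m = len(img)
--     for i, row in enumerate(img):
--         r = i - y
--         if r < 0:
--             r = 0
--         elif r > m - 1:
--             r = m - 1
--         for j in range(len(row)):
--             row[j] = H[r][j]
--     return img
-- ===== Notes on version B (the rewrite author's own statement) =====
-- stated objective: simpler
-- what changed: A shifts in place with four order-dependent loops (reversed vs forward iteration chosen by the sign of the shift, with separate edge branches); B snapshots the rows once and fills every cell by a single clamped-index lookup (row[j] = orig[i][clamp(j-x)], then H[clamp(i-y)][j]), one uniform rule per pass.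
import Mathlib
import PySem

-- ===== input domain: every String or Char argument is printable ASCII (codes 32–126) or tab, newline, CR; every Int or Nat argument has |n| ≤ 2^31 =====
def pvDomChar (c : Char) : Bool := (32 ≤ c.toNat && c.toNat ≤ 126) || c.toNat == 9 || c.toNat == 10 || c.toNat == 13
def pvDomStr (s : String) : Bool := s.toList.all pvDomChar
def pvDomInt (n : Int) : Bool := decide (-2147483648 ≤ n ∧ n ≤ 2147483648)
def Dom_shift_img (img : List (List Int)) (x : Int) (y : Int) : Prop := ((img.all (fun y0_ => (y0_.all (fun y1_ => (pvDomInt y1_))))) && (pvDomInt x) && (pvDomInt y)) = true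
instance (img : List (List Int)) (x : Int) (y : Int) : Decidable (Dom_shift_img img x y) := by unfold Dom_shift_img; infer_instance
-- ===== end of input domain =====

-- B replaces A's order-dependent in-place shifting loops by clamped-index lookups in a
-- snapshot (objective: simpler). Python A and B mutate img in place; the equivalence
-- proved here is about the returned value (which is the mutated img in both).

-- ===== PORT A =====

-- Python `l[i]` as A reads it (index is non-negative and, on Pre_, in range).
def pvIdxI (l : List Int) (i : Int) : Int := (PySem.List.pyGet? l i).getD 0

-- Python `m[i]` (a row read); on Pre_ the index is in range.
def pvRowI (m : List (List Int)) (i : Int) : List Int := (PySem.List.pyGet? m i).getD []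

-- A's first (horizontal) inner loops over one row, in place.
def pvHRowA (x : Int) (row : List Int) : List Int :=
  if x ≥ 0 then
    (List.range row.length).reverse.foldl
      (fun r j => r.set j (if (j : Int) ≥ x then pvIdxI r ((j : Int) - x) else pvIdxI r 0)) row
  else
    (List.range row.length).foldl
      (fun r j => r.set j (if (j : Int) < (row.length : Int) + x then pvIdxI r ((j : Int) - x)
                           else pvIdxI r ((row.length : Int) - 1))) row

-- A's vertical inner loop for y ≥ 0 (one row i; mutates the matrix in place).
def pvVStepGeA (y : Int) (m : List (List Int)) (i : Nat) : List (List Int) :=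
  (List.range ((m.getD i []).length)).foldl
    (fun m j => m.set i ((m.getD i []).set j
      (if (i : Int) ≥ y then pvIdxI (pvRowI m ((i : Int) - y)) (j : Int)
       else pvIdxI (pvRowI m 0) (j : Int)))) m

-- A's vertical inner loops for y < 0 (one row i).
def pvVStepLtA (y : Int) (n : Nat) (m : List (List Int)) (i : Nat) : List (List Int) :=
  if (i : Int) < (n : Int) + y then
    (List.range ((m.getD i []).length)).foldl
      (fun m j => m.set i ((m.getD i []).set j (pvIdxI (pvRowI m ((i : Int) - y)) (j : Int)))) m
  else
    (List.range ((m.getD i []).length)).foldl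
      (fun m j => m.set i ((m.getD i []).set j (pvIdxI (pvRowI m ((n : Int) - 1)) (j : Int)))) m

def shift_img (img : List (List Int)) (x : Int) (y : Int) : List (List Int) :=
  let m1 := (List.range img.length).foldl (fun m i => m.set i (pvHRowA x (m.getD i []))) img
  let n := m1.length
  if y ≥ 0 then (List.range n).reverse.foldl (pvVStepGeA y) m1
  else (List.range n).foldl (pvVStepLtA y n) m1

-- ===== PORT B =====

-- B's clamp of an index to [0, hi].
def pvClamp (c : Int) (hi : Int) : Int := if c < 0 then 0 else if c > hi then hi else c

-- B's horizontal pass on one row: each cell looked up at a clamped column in the snapshot.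
def pvHRowB (x : Int) (row : List Int) : List Int :=
  (List.range row.length).map (fun (j : Nat) => pvIdxI row (pvClamp ((j : Int) - x) ((row.length : Int) - 1)))

def shift_img_alt (img : List (List Int)) (x : Int) (y : Int) : List (List Int) :=
  let H := img.map (pvHRowB x)
  let n := H.length
  (List.range n).map (fun i =>
    (List.range ((H.getD i []).length)).map
      (fun (j : Nat) => pvIdxI (H.getD (pvClamp ((i : Int) - y) ((n : Int) - 1)).toNat []) (j : Int)))

-- ===== PRECONDITION & SPEC =====
-- Pre_ excludes exactly the ragged images on which Python A raises IndexError in its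
-- vertical pass (the clamped source row is shorter than the row being written).
def Pre_shift_img (img : List (List Int)) (x : Int) (y : Int) : Prop :=
  ∀ i ∈ List.range img.length,
    (img.getD (pvClamp ((i : Int) - y) ((img.length : Int) - 1)).toNat []).length
      ≥ (img.getD i []).length
instance (img : List (List Int)) (x : Int) (y : Int) : Decidable (Pre_shift_img img x y) := by
  unfold Pre_shift_img; infer_instance

def pvWitness_shift_img : List (List Int) × Int × Int := ([[1, 2], [3, 4]], 1, 1)

def Spec_shift_img (img : List (List Int)) (x : Int) (y : Int) (out : List (List Int)) : Prop := out = shift_img_alt img x y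
instance (img : List (List Int)) (x : Int) (y : Int) (out : List (List Int)) : Decidable (Spec_shift_img img x y out) := by unfold Spec_shift_img; infer_instance

-- ===== CLAIM (what is proved, stated in full; the proofs are below) =====
def Claim_equal_shift_img : Prop := ∀ (img : List (List Int)) (x : Int) (y : Int), Dom_shift_img img x y → Pre_shift_img img x y → Spec_shift_img img x y (shift_img img x y)

-- ===== LEMMAS AND PROOFS =====

-- getElem? of a map over a range.
lemma pvGetMapRange {α : Type} (f : Nat → α) (n i : Nat) :
    ((List.range n).map f)[i]? = if i < n then some (f i) else none := by
  by_cases h : i < n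
  · rw [List.getElem?_eq_getElem (by simpa using h)]; simp [h]
  · rw [List.getElem?_eq_none (by simpa using Nat.le_of_not_lt h)]; simp [h]

-- Setting an entry to its own value is the identity (also out of range, where set is a no-op).
lemma pvSetGetDSelf {α : Type} (l : List α) (j : Nat) (d : α) : l.set j (l.getD j d) = l := by
  apply List.ext_getElem?
  intro t
  by_cases ht : t = j
  · subst ht
    by_cases hl : t < l.length
    · rw [List.getElem?_set_self (by simpa using hl)]
      rw [List.getD_eq_getElem?_getD, List.getElem?_eq_getElem hl]
      simp
    · rw [List.getElem?_eq_none (by simpa using Nat.le_of_not_lt hl),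
          List.getElem?_eq_none (by simpa using Nat.le_of_not_lt hl)]
  · exact List.getElem?_set_ne (fun he => ht he.symm)

-- A right-to-left index loop whose step writes a value depending only on entries ≤ j,
-- characterised pointwise.
lemma pvFoldRev {α : Type} (h : List α → Nat → List α) (g : Nat → α) (base : List α)
    (hstep : ∀ r j, r.length = base.length → j < base.length →
      (∀ t, t ≤ j → r[t]? = base[t]?) → h r j = r.set j (g j)) :
    ∀ k, k ≤ base.length → ∀ r, r.length = base.length → (∀ t, t < k → r[t]? = base[t]?) →
      ∀ jj, ((List.range k).reverse.foldl h r)[jj]? = if jj < k then some (g jj) else r[jj]? := by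
  intro k
  induction k with
  | zero => intro _ r _ _ jj; simp
  | succ k ih =>
    intro hk r hlen hagree jj
    have hstepk : h r k = r.set k (g k) :=
      hstep r k hlen (by omega) (fun t ht => hagree t (by omega))
    rw [List.range_succ]
    simp only [List.reverse_append, List.reverse_singleton, List.singleton_append,
      List.foldl_cons]
    rw [hstepk]
    have ih' := ih (by omega) (r.set k (g k)) (by simp [hlen])
      (fun t ht => by
        rw [List.getElem?_set_ne (by omega : k ≠ t)]
        exact hagree t (by omega)) jj
    rw [ih']
    by_cases h1 : jj < k
    · rw [if_pos h1, if_pos (by omega)]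
    · by_cases h2 : jj = k
      · subst h2
        rw [if_neg h1, if_pos (by omega)]
        rw [List.getElem?_set_self (by omega)]
      · rw [if_neg h1, if_neg (by omega)]
        exact List.getElem?_set_ne (by omega)

-- Same for a left-to-right loop whose step depends only on entries ≥ j.
lemma pvFoldFwd {α : Type} (h : List α → Nat → List α) (g : Nat → α) (base : List α)
    (hstep : ∀ r j, r.length = base.length → j < base.length →
      (∀ t, j ≤ t → r[t]? = base[t]?) → h r j = r.set j (g j)) :
    ∀ d k, k + d = base.length → ∀ r, r.length = base.length → (∀ t, k ≤ t → r[t]? = base[t]?) →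
      ∀ jj, ((List.range' k d).foldl h r)[jj]? =
        if k ≤ jj ∧ jj < base.length then some (g jj) else r[jj]? := by
  intro d
  induction d with
  | zero =>
    intro k hk r _ _ jj
    simp only [List.range', List.foldl_nil]
    rw [if_neg (by omega)]
  | succ d ih =>
    intro k hk r hlen hagree jj
    have hstepk : h r k = r.set k (g k) :=
      hstep r k hlen (by omega) (fun t ht => hagree t ht)
    rw [List.range'_succ, List.foldl_cons, hstepk]
    have ih' := ih (k + 1) (by omega) (r.set k (g k)) (by simp [hlen])
      (fun t ht => by
        rw [List.getElem?_set_ne (by omega : k ≠ t)]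
        exact hagree t (by omega)) jj
    rw [ih']
    by_cases h1 : k + 1 ≤ jj ∧ jj < base.length
    · rw [if_pos h1, if_pos (by omega)]
    · by_cases h2 : jj = k
      · subst h2
        rw [if_neg h1, if_pos (by omega)]
        rw [List.getElem?_set_self (by omega)]
      · rw [if_neg h1, if_neg (by omega)]
        exact List.getElem?_set_ne (by omega)

-- The two loop shapes, run over the whole index range from the base itself, produce the map.
lemma pvFoldRevEq {α : Type} (h : List α → Nat → List α) (g : Nat → α) (base : List α)
    (hstep : ∀ r j, r.length = base.length → j < base.length →
      (∀ t, t ≤ j → r[t]? = base[t]?) → h r j = r.set j (g j)) :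
    (List.range base.length).reverse.foldl h base = (List.range base.length).map g := by
  apply List.ext_getElem?
  intro jj
  rw [pvFoldRev h g base hstep base.length le_rfl base rfl (fun _ _ => rfl) jj, pvGetMapRange]
  by_cases hj : jj < base.length
  · rw [if_pos hj, if_pos hj]
  · rw [if_neg hj, if_neg hj, List.getElem?_eq_none (by simpa using Nat.le_of_not_lt hj)]

lemma pvFoldFwdEq {α : Type} (h : List α → Nat → List α) (g : Nat → α) (base : List α)
    (hstep : ∀ r j, r.length = base.length → j < base.length →
      (∀ t, j ≤ t → r[t]? = base[t]?) → h r j = r.set j (g j)) :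
    (List.range base.length).foldl h base = (List.range base.length).map g := by
  apply List.ext_getElem?
  intro jj
  have h1 := pvFoldFwd h g base hstep base.length 0 (by omega) base rfl (fun _ _ => rfl) jj
  conv_lhs => rw [List.range_eq_range']
  rw [h1, pvGetMapRange]
  by_cases hj : jj < base.length
  · rw [if_pos (And.intro (Nat.zero_le jj) hj), if_pos hj]
  · rw [if_neg (fun hc => hj hc.2), if_neg hj,
      List.getElem?_eq_none (by simpa using Nat.le_of_not_lt hj)]

-- pvIdxI is determined by getElem? at the (non-negative) index.
lemma pvIdxI_congr (l l' : List Int) (i : Int) (h0 : 0 ≤ i)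
    (h : l[i.toNat]? = l'[i.toNat]?) : pvIdxI l i = pvIdxI l' i := by
  unfold pvIdxI
  rw [← Int.toNat_of_nonneg h0, PySem.List.pyGet?_natCast, PySem.List.pyGet?_natCast, h]

lemma pvIdxI_natCast (l : List Int) (j : Nat) : pvIdxI l (j : Int) = l.getD j 0 := by
  unfold pvIdxI
  rw [PySem.List.pyGet?_natCast, List.getD_eq_getElem?_getD]

lemma pvRowI_toNat (i : Int) (h : 0 ≤ i) (m : List (List Int)) :
    pvRowI m i = m.getD i.toNat [] := by
  obtain ⟨n, rfl⟩ := Int.eq_ofNat_of_zero_le h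
  unfold pvRowI
  rw [PySem.List.pyGet?_natCast, List.getD_eq_getElem?_getD, Int.toNat_natCast]

-- getD agrees when getElem? agrees.
lemma pvGetDCongr {α : Type} (l l' : List α) (t : Nat) (d : α) (h : l[t]? = l'[t]?) :
    l.getD t d = l'.getD t d := by
  rw [List.getD_eq_getElem?_getD, List.getD_eq_getElem?_getD, h]

-- ===== horizontal pass =====

lemma pvHRow_eq (x : Int) (row : List Int) : pvHRowA x row = pvHRowB x row := by
  unfold pvHRowA pvHRowB
  by_cases hx : x ≥ 0
  · rw [if_pos hx]
    apply pvFoldRevEq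
    intro r j hlen hj hagree
    congr 1
    by_cases hjx : (j : Int) ≥ x
    · rw [if_pos hjx]
      have hcl : pvClamp ((j : Int) - x) ((row.length : Int) - 1) = (j : Int) - x := by
        unfold pvClamp
        rw [if_neg (by omega), if_neg (by omega)]
      rw [hcl]
      exact pvIdxI_congr r row _ (by omega)
        (hagree _ (by omega))
    · rw [if_neg hjx]
      have hcl : pvClamp ((j : Int) - x) ((row.length : Int) - 1) = 0 := by
        unfold pvClamp
        rw [if_pos (by omega)]
      rw [hcl]
      exact pvIdxI_congr r row 0 le_rfl (hagree 0 (by omega))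
  · rw [if_neg hx]
    apply pvFoldFwdEq
    intro r j hlen hj hagree
    congr 1
    by_cases hjx : (j : Int) < (row.length : Int) + x
    · rw [if_pos hjx]
      have hcl : pvClamp ((j : Int) - x) ((row.length : Int) - 1) = (j : Int) - x := by
        unfold pvClamp
        rw [if_neg (by omega), if_neg (by omega)]
      rw [hcl]
      exact pvIdxI_congr r row _ (by omega)
        (hagree _ (by omega))
    · rw [if_neg hjx]
      have hcl : pvClamp ((j : Int) - x) ((row.length : Int) - 1) = (row.length : Int) - 1 := by
        unfold pvClamp
        rw [if_neg (by omega), if_pos (by omega)]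
      rw [hcl]
      exact pvIdxI_congr r row _ (by omega)
        (hagree _ (by omega))

-- A's first pass (row-by-row in-place rewrite) is the map of pvHRowB over the rows.
lemma pvPass1_eq (x : Int) (img : List (List Int)) :
    (List.range img.length).foldl (fun m i => m.set i (pvHRowA x (m.getD i []))) img
      = img.map (pvHRowB x) := by
  have h1 : (List.range img.length).foldl (fun m i => m.set i (pvHRowA x (m.getD i []))) img
      = (List.range img.length).map (fun i => pvHRowB x (img.getD i [])) := by
    apply pvFoldFwdEq
    intro r i hlen hi hagree
    rw [pvGetDCongr r img i [] (hagree i le_rfl), pvHRow_eq]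
  rw [h1]
  apply List.ext_getElem?
  intro i
  rw [pvGetMapRange]
  by_cases hi : i < img.length
  · rw [List.getElem?_eq_getElem (by simpa using hi), if_pos hi]
    rw [List.getD_eq_getElem?_getD, List.getElem?_eq_getElem hi]
    simp
  · rw [List.getElem?_eq_none (by simpa using Nat.le_of_not_lt hi), if_neg hi]

-- ===== vertical pass =====

-- Copying a fixed row R into a row, cell by cell, is a map.
lemma pvRowCopy (R row : List Int) :
    (List.range row.length).foldl (fun r j => r.set j (pvIdxI R (j : Int))) row
      = (List.range row.length).map (fun (j : Nat) => pvIdxI R (j : Int)) := by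
  apply pvFoldFwdEq
  intro r j _ _ _
  rfl

-- The in-place inner copy loop factors as one set of row i.
lemma pvInner_eq (m : List (List Int)) (i s : Nat) (hi : i < m.length) (l : List Nat) :
    l.foldl (fun m j => m.set i ((m.getD i []).set j (pvIdxI (m.getD s []) (j : Int)))) m
      = m.set i (l.foldl (fun r j => r.set j (pvIdxI (m.getD s []) (j : Int))) (m.getD i [])) := by
  by_cases hs : s = i
  · subst hs
    have hrow : ∀ l' : List Nat,
        l'.foldl (fun r j => r.set j (pvIdxI (m.getD s []) (j : Int))) (m.getD s [])
          = m.getD s [] := by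
      intro l'
      induction l' with
      | nil => rfl
      | cons j l' ih =>
        rw [List.foldl_cons, pvIdxI_natCast, pvSetGetDSelf, ih]
    have hm : ∀ l' : List Nat,
        l'.foldl (fun m' j => m'.set s ((m'.getD s []).set j (pvIdxI (m'.getD s []) (j : Int)))) m
          = m := by
      intro l'
      induction l' with
      | nil => rfl
      | cons j l' ih =>
        rw [List.foldl_cons, pvIdxI_natCast, pvSetGetDSelf, pvSetGetDSelf, ih]
    rw [hm l, hrow l, pvSetGetDSelf]
  · induction l generalizing m with
    | nil =>
      rw [List.foldl_nil, List.foldl_nil, pvSetGetDSelf]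
    | cons j l ih =>
      rw [List.foldl_cons, List.foldl_cons]
      have hgs : (m.set i ((m.getD i []).set j (pvIdxI (m.getD s []) (j : Int)))).getD s []
          = m.getD s [] :=
        pvGetDCongr _ _ _ _ (List.getElem?_set_ne (fun he => hs he.symm))
      have hgi : (m.set i ((m.getD i []).set j (pvIdxI (m.getD s []) (j : Int)))).getD i []
          = (m.getD i []).set j (pvIdxI (m.getD s []) (j : Int)) := by
        rw [List.getD_eq_getElem?_getD, List.getElem?_set_self (by simpa using hi)]
        rfl
      rw [ih _ (by simpa using hi)]
      rw [hgs, hgi, List.set_set]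

-- the clamped source row index of B, as a Nat
lemma pvClampToNat_ge (i n : Nat) (y : Int) (hy : 0 ≤ y) (hin : i < n) :
    (pvClamp ((i : Int) - y) ((n : Int) - 1)).toNat
      = if (i : Int) ≥ y then ((i : Int) - y).toNat else 0 := by
  unfold pvClamp
  by_cases hiy : (i : Int) ≥ y
  · rw [if_pos hiy, if_neg (by omega), if_neg (by omega)]
  · rw [if_neg hiy, if_pos (by omega)]
    rfl

lemma pvClampToNat_lt (i n : Nat) (y : Int) (hy : ¬ y ≥ 0) (hin : i < n) :
    (pvClamp ((i : Int) - y) ((n : Int) - 1)).toNat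
      = if (i : Int) < (n : Int) + y then ((i : Int) - y).toNat else n - 1 := by
  unfold pvClamp
  by_cases hc : (i : Int) < (n : Int) + y
  · rw [if_pos hc, if_neg (by omega), if_neg (by omega)]
  · rw [if_neg hc, if_neg (by omega), if_pos (by omega)]
    omega

-- one vertical row-step, rewritten as a single set of the B-shaped row (y ≥ 0 case)
lemma pvVStepGeA_set (y : Int) (hy : y ≥ 0) (H : List (List Int)) (r : List (List Int)) (i : Nat)
    (hlen : r.length = H.length) (hi : i < H.length)
    (hagree : ∀ t, t ≤ i → r[t]? = H[t]?) :
    pvVStepGeA y r i = r.set i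
      ((List.range ((H.getD i []).length)).map
        (fun (j : Nat) => pvIdxI (H.getD (pvClamp ((i : Int) - y) ((H.length : Int) - 1)).toNat []) (j : Int))) := by
  unfold pvVStepGeA
  rw [pvClampToNat_ge i H.length y hy hi]
  by_cases hiy : (i : Int) ≥ y
  · simp only [if_pos hiy]
    have h0 : (0 : Int) ≤ (i : Int) - y := by omega
    simp only [pvRowI_toNat ((i : Int) - y) h0]
    rw [pvInner_eq r i (((i : Int) - y).toNat) (by omega) _, pvRowCopy]
    rw [pvGetDCongr r H i [] (hagree i le_rfl),
        pvGetDCongr r H (((i : Int) - y).toNat) []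
          (hagree _ (by omega))]
  · simp only [if_neg hiy]
    simp only [pvRowI_toNat 0 le_rfl, Int.toNat_zero]
    rw [pvInner_eq r i 0 (by omega) _, pvRowCopy]
    rw [pvGetDCongr r H i [] (hagree i le_rfl),
        pvGetDCongr r H 0 [] (hagree 0 (by omega))]

-- one vertical row-step as a single set (y < 0 case)
lemma pvVStepLtA_set (y : Int) (hy : ¬ y ≥ 0) (H : List (List Int)) (r : List (List Int)) (i : Nat)
    (hlen : r.length = H.length) (hi : i < H.length)
    (hagree : ∀ t, i ≤ t → r[t]? = H[t]?) :
    pvVStepLtA y H.length r i = r.set i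
      ((List.range ((H.getD i []).length)).map
        (fun (j : Nat) => pvIdxI (H.getD (pvClamp ((i : Int) - y) ((H.length : Int) - 1)).toNat []) (j : Int))) := by
  unfold pvVStepLtA
  rw [pvClampToNat_lt i H.length y hy hi]
  by_cases hc : (i : Int) < (H.length : Int) + y
  · rw [if_pos hc]
    simp only [if_pos hc]
    have h0 : (0 : Int) ≤ (i : Int) - y := by omega
    simp only [pvRowI_toNat ((i : Int) - y) h0]
    rw [pvInner_eq r i (((i : Int) - y).toNat) (by omega) _, pvRowCopy]
    rw [pvGetDCongr r H i [] (hagree i le_rfl),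
        pvGetDCongr r H (((i : Int) - y).toNat) []
          (hagree _ (by omega))]
  · rw [if_neg hc]
    simp only [if_neg hc]
    have h0 : (0 : Int) ≤ (H.length : Int) - 1 := by omega
    simp only [pvRowI_toNat ((H.length : Int) - 1) h0]
    have htn : ((H.length : Int) - 1).toNat = H.length - 1 := by omega
    rw [htn]
    rw [pvInner_eq r i (H.length - 1) (by omega) _, pvRowCopy]
    rw [pvGetDCongr r H i [] (hagree i le_rfl),
        pvGetDCongr r H (H.length - 1) [] (hagree _ (by omega))]

-- ===== main equality =====

lemma pvMain (img : List (List Int)) (x y : Int) :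
    shift_img img x y = shift_img_alt img x y := by
  unfold shift_img shift_img_alt
  rw [pvPass1_eq]
  have hlen : (img.map (pvHRowB x)).length = img.length := by simp
  by_cases hy : y ≥ 0
  · rw [if_pos hy]
    exact pvFoldRevEq (pvVStepGeA y) _ (img.map (pvHRowB x))
      (fun r i hl hi hagree => pvVStepGeA_set y hy (img.map (pvHRowB x)) r i hl hi hagree)
  · rw [if_neg hy]
    exact pvFoldFwdEq (pvVStepLtA y (img.map (pvHRowB x)).length) _ (img.map (pvHRowB x))
      (fun r i hl hi hagree => pvVStepLtA_set y hy (img.map (pvHRowB x)) r i hl hi hagree)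

-- ===== VERDICT (by name: the statement is the Claim_ definition above) =====
theorem shift_img_spec : Claim_equal_shift_img := by
  intro img x y _ _
  unfold Spec_shift_img
  exact pvMain img x y
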